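-- pv_equiv track=rewrite | github.com/JAMM-JAMM/algorithm-study | Programmers/PS/level1/대충 만든 자판.py | num_of_key
-- ===== SOURCE A (Python) =====
-- def num_of_key(keymap):
--     key_dict = dict()
--     for m in keymap:
--         for i, k in enumerate(m):
--             if k not in key_dict:
--                 key_dict[k] = i+1
--             else:
--                 if key_dict[k] > i+1:
--                     key_dict[k] = i+1
--     return key_dict
-- ===== SOURCE B (Python) =====
-- def num_of_key(keymap):
--     # Pass 1: collect every 1-based occurrence index of each character.
--     occ = {}
--     for m in keymap:
--         for i, k in enumerate(m):
--             occ.setdefault(k, []).append(i + 1)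
--     # Pass 2: reduce each occurrence list to its minimum.
--     return {k: min(v) for k, v in occ.items()}
-- ===== Notes on version B (the rewrite author's own statement) =====
-- stated objective: alternative
-- what changed: Instead of folding a running minimum into the dict during the scan, B first groups all 1-based occurrence indices per character into lists (setdefault/append) and then reduces each list to its minimum in a second pass, preserving first-appearance key order.
import Mathlib
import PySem

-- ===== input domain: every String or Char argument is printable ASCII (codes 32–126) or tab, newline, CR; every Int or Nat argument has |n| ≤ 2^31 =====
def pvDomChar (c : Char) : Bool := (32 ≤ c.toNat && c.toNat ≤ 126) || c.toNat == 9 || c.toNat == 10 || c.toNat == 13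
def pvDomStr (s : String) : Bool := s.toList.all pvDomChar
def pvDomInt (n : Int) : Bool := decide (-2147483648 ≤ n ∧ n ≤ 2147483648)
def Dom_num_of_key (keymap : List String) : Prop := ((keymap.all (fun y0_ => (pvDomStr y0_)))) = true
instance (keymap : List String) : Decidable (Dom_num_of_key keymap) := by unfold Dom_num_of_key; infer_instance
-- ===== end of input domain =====

-- B groups all 1-based occurrence indices per character into lists in a first pass,
-- then reduces each list to its minimum in a second pass (alternative decomposition, same cost).

-- ===== PORT A =====
def num_of_key (keymap : List String) : List (String × Int) :=
  (keymap.foldl (fun key_dict m =>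
      (PySem.List.enumerate m.toList).foldl (fun key_dict ik =>
        let key := String.ofList [ik.2]
        if key_dict.contains key = false then
          key_dict.insert key (ik.1 + 1)
        else
          if key_dict.getD key 0 > ik.1 + 1 then key_dict.insert key (ik.1 + 1)
          else key_dict)
        key_dict)
    PySem.Dict.empty).items

-- ===== PORT B =====
-- min(v) for a list of ints; the default 0 is never reached (every collected list is nonempty)
def pyMin (v : List Int) : Int := (PySem.List.min? v (fun x => x)).getD 0

def num_of_key_alt (keymap : List String) : List (String × Int) :=
  let occ := keymap.foldl (fun occ m =>
      (PySem.List.enumerate m.toList).foldl (fun occ ik =>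
        occ.modify (String.ofList [ik.2]) [] (fun l => l ++ [ik.1 + 1])) occ)
    PySem.Dict.empty
  occ.items.map (fun kv => (kv.1, pyMin kv.2))

-- ===== PRECONDITION & SPEC =====
def Spec_num_of_key (keymap : List String) (out : List (String × Int)) : Prop := out = num_of_key_alt keymap
instance (keymap : List String) (out : List (String × Int)) : Decidable (Spec_num_of_key keymap out) := by unfold Spec_num_of_key; infer_instance

-- ===== CLAIM (what is proved, stated in full; the proofs are below) =====
def Claim_equal_num_of_key : Prop := ∀ (keymap : List String), Dom_num_of_key keymap → Spec_num_of_key keymap (num_of_key keymap)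

-- ===== LEMMAS AND PROOFS =====

-- abbreviation for B's value map on items
def pvG (kv : String × List Int) : String × Int := (kv.1, pyMin kv.2)

-- invariant on B's occurrence dict
def GoodOcc (occ : PySem.Dict String (List Int)) : Prop :=
  occ.keys.Nodup ∧ ∀ kv ∈ occ.items, kv.2 ≠ []

lemma pyMin_singleton (n : Int) : pyMin [n] = n := by
  simp [pyMin, PySem.List.min?]

lemma pyMin_append_singleton {v : List Int} (hv : v ≠ []) (n : Int) :
    pyMin (v ++ [n]) = if pyMin v > n then n else pyMin v := by
  cases h : PySem.List.min? v (fun x => x) with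
  | none => exact absurd ((PySem.List.min?_eq_none_iff v (fun x => x)).mp h) hv
  | some m =>
    simp only [pyMin, PySem.List.min?, List.foldl_append] at *
    rw [h]
    simp only [List.foldl, Option.getD_some]
    by_cases hlt : n < m
    · simp [hlt]
    · have : ¬ m > n := by omega
      simp [hlt]

lemma contains_map_g (l : List (String × List Int)) (k : String) :
    (PySem.Dict.mk (l.map pvG)).contains k = (PySem.Dict.mk l).contains k := by
  simp only [PySem.Dict.contains, List.any_map]
  apply congrArg
  funext p
  rfl

lemma get?_map_g (l : List (String × List Int)) (k : String) :
    (PySem.Dict.mk (l.map pvG)).get? k = ((PySem.Dict.mk l).get? k).map pyMin := by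
  induction l with
  | nil => simp [PySem.Dict.get?]
  | cons a t ih =>
    simp only [List.map_cons]
    by_cases h : a.1 == k
    · simp [PySem.Dict.get?, List.find?, pvG, h]
    · rw [PySem.Dict.get?_mk_cons, PySem.Dict.get?_mk_cons]
      simp only [pvG, h]
      simpa [pvG] using ih

lemma step_good (occ : PySem.Dict String (List Int)) (h : GoodOcc occ) (k : String) (n : Int) :
    GoodOcc (occ.modify k [] (fun l => l ++ [n])) := by
  obtain ⟨hnd, hne⟩ := h
  constructor
  · simpa [PySem.Dict.modify] using PySem.Dict.nodup_keys_insert occ k _ hnd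
  · intro kv hkv
    simp only [PySem.Dict.modify] at hkv
    rcases (PySem.Dict.mem_items_insert _ _ _ _).mp hkv with h1 | h2
    · subst h1; simp
    · exact hne kv h2.1

lemma mem_items_eq_of_nodup {occ : PySem.Dict String (List Int)} (hnd : occ.keys.Nodup)
    {k : String} {v : List Int} (hkv : (k, v) ∈ occ.items)
    {p : String × List Int} (hp : p ∈ occ.items) (hpk : p.1 = k) : p = (k, v) := by
  have h1 := PySem.Dict.get?_of_mem_items occ hkv hnd
  have h2 := PySem.Dict.get?_of_mem_items occ (show (p.1, p.2) ∈ occ.items from hp) hnd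
  rw [hpk, h1] at h2
  have : v = p.2 := by injection h2
  cases p; simp_all

lemma step_eq (occ : PySem.Dict String (List Int)) (h : GoodOcc occ) (k : String) (n : Int) :
    (let key := k
     let d := PySem.Dict.mk (occ.items.map pvG)
     if d.contains key = false then d.insert key n
     else if d.getD key 0 > n then d.insert key n else d)
    = PySem.Dict.mk ((occ.modify k [] (fun l => l ++ [n])).items.map pvG) := by
  obtain ⟨hnd, hne⟩ := h
  by_cases hc : occ.contains k
  · -- key present
    have hg : (occ.get? k).isSome := by
      rw [← PySem.Dict.contains_eq_isSome_get?]; exact hc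
    obtain ⟨v, hv⟩ : ∃ v, occ.get? k = some v := Option.isSome_iff_exists.mp hg
    have hvmem : (k, v) ∈ occ.items := PySem.Dict.mem_items_of_get?_eq_some occ hv
    have hvne : v ≠ [] := hne _ hvmem
    have hcd : (PySem.Dict.mk (occ.items.map pvG)).contains k = true := by
      rw [contains_map_g]; exact hc
    have hget : (PySem.Dict.mk (occ.items.map pvG)).getD k 0 = pyMin v := by
      simp [PySem.Dict.getD, get?_map_g, hv]
    have hgetD : occ.getD k [] = v := by simp [PySem.Dict.getD, hv]
    simp only [hcd, Bool.true_eq_false, if_false, hget]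
    rw [show occ.modify k [] (fun l => l ++ [n]) = occ.insert k (v ++ [n]) by
      simp [PySem.Dict.modify, hgetD]]
    rw [PySem.Dict.items_insert_of_contains _ _ hc]
    by_cases hlt : pyMin v > n
    · simp only [hlt, if_true]
      apply PySem.Dict.ext
      rw [PySem.Dict.items_insert_of_contains _ _ hcd]
      show (occ.items.map pvG).map _ = _
      rw [List.map_map, List.map_map]
      apply List.map_congr_left
      intro p hp
      by_cases hpk : p.1 == k
      · simp [Function.comp, pvG, hpk, pyMin_append_singleton hvne, hlt]
      · simp [Function.comp, pvG, hpk]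
    · simp only [hlt, if_false]
      apply PySem.Dict.ext
      show occ.items.map pvG = (occ.items.map _).map pvG
      rw [List.map_map]
      apply List.map_congr_left
      intro p hp
      by_cases hpk : p.1 == k
      · have hpeq : p = (k, v) :=
          mem_items_eq_of_nodup hnd hvmem hp (by exact eq_of_beq hpk)
        subst hpeq
        simp [Function.comp, pvG, pyMin_append_singleton hvne, hlt]
      · simp [Function.comp, pvG, hpk]
  · -- key absent
    have hcd : (PySem.Dict.mk (occ.items.map pvG)).contains k = false := by
      rw [contains_map_g]; exact Bool.not_eq_true _ |>.mp hc
    have hgetD : occ.getD k [] = [] := by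
      exact PySem.Dict.getD_of_not_contains _ _ (Bool.not_eq_true _ |>.mp hc)
    simp only [hcd, if_true]
    rw [show occ.modify k [] (fun l => l ++ [n]) = occ.insert k [n] by
      simp [PySem.Dict.modify, hgetD]]
    apply PySem.Dict.ext
    rw [PySem.Dict.items_insert_of_not_contains _ _ (Bool.not_eq_true _ |>.mp hc),
        PySem.Dict.items_insert_of_not_contains _ _ hcd]
    simp [pvG, pyMin_singleton]

lemma inner_eq (l : List (Int × Char)) (occ : PySem.Dict String (List Int)) (h : GoodOcc occ) :
    (l.foldl (fun key_dict ik =>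
        let key := String.ofList [ik.2]
        if key_dict.contains key = false then key_dict.insert key (ik.1 + 1)
        else if key_dict.getD key 0 > ik.1 + 1 then key_dict.insert key (ik.1 + 1)
        else key_dict)
      (PySem.Dict.mk (occ.items.map pvG)))
    = PySem.Dict.mk ((l.foldl (fun occ ik =>
        occ.modify (String.ofList [ik.2]) [] (fun l => l ++ [ik.1 + 1])) occ).items.map pvG)
    ∧ GoodOcc (l.foldl (fun occ ik =>
        occ.modify (String.ofList [ik.2]) [] (fun l => l ++ [ik.1 + 1])) occ) := by
  induction l generalizing occ with
  | nil => exact ⟨rfl, h⟩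
  | cons a t ih =>
    have hstep := step_eq occ h (String.ofList [a.2]) (a.1 + 1)
    have hgood := step_good occ h (String.ofList [a.2]) (a.1 + 1)
    simp only [List.foldl_cons]
    rw [show (let key := String.ofList [a.2]
        let d := PySem.Dict.mk (occ.items.map pvG)
        if d.contains key = false then d.insert key (a.1 + 1)
        else if d.getD key 0 > a.1 + 1 then d.insert key (a.1 + 1) else d)
        = PySem.Dict.mk (((occ.modify (String.ofList [a.2]) [] (fun l => l ++ [a.1 + 1]))).items.map pvG)
        from hstep]
    exact ih _ hgood

lemma outer_eq (keymap : List String) (occ : PySem.Dict String (List Int)) (h : GoodOcc occ) :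
    (keymap.foldl (fun key_dict m =>
        (PySem.List.enumerate m.toList).foldl (fun key_dict ik =>
          let key := String.ofList [ik.2]
          if key_dict.contains key = false then key_dict.insert key (ik.1 + 1)
          else if key_dict.getD key 0 > ik.1 + 1 then key_dict.insert key (ik.1 + 1)
          else key_dict) key_dict)
      (PySem.Dict.mk (occ.items.map pvG)))
    = PySem.Dict.mk ((keymap.foldl (fun occ m =>
        (PySem.List.enumerate m.toList).foldl (fun occ ik =>
          occ.modify (String.ofList [ik.2]) [] (fun l => l ++ [ik.1 + 1])) occ) occ).items.map pvG) := by
  induction keymap generalizing occ with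
  | nil => rfl
  | cons m t ih =>
    simp only [List.foldl_cons]
    obtain ⟨heq, hgood⟩ := inner_eq (PySem.List.enumerate m.toList) occ h
    rw [heq]
    exact ih _ hgood

-- ===== VERDICT (by name: the statement is the Claim_ definition above) =====
theorem num_of_key_spec : Claim_equal_num_of_key := by
  intro keymap _
  unfold Spec_num_of_key num_of_key num_of_key_alt
  have h := outer_eq keymap (PySem.Dict.mk []) ⟨by simp [PySem.Dict.keys], by simp⟩
  simp only [List.map_nil] at h
  rw [show (PySem.Dict.empty : PySem.Dict String Int) = PySem.Dict.mk [] from rfl,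
      show (PySem.Dict.empty : PySem.Dict String (List Int)) = PySem.Dict.mk [] from rfl]
  rw [h]
  rfl
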